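-- pv_equiv track=rewrite | github.com/MaxKim-J/Algo | baekjoon/202003/1193-fractal.py | chunk_cal
-- ===== SOURCE A (Python) =====
-- def chunk_cal(chunk, order):
--     if chunk % 2 == 0:
--         left, right = 1, chunk
--         for _ in range(order):
--             left += 1
--             right -= 1
--     else:
--         left, right = chunk, 1
--         for _ in range(order):
--             left -= 1
--             right += 1
--
--     return f"{left}/{right}"
-- ===== SOURCE B (Python) =====
-- def chunk_cal(chunk, order):
--     k = max(order, 0)
--     if chunk % 2 == 0:
--         return f"{1 + k}/{chunk - k}"
--     return f"{chunk - k}/{1 + k}"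
-- ===== Notes on version B (the rewrite author's own statement) =====
-- stated objective: faster
-- what changed: Replaces the order-step increment/decrement loop with closed-form arithmetic (k = max(order,0); left/right computed directly).
import Mathlib
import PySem

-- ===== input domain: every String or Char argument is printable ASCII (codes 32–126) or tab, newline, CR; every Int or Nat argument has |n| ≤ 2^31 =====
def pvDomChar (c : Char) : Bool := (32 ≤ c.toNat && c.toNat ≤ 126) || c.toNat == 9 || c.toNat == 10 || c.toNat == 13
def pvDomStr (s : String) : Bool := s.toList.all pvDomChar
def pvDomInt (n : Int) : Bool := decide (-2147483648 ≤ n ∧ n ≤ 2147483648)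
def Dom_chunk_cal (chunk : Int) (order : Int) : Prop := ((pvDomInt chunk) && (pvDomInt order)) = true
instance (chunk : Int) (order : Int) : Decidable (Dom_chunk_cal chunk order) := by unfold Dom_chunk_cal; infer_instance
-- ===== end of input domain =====

-- B replaces A's order-step increment loop with closed-form arithmetic (O(order) -> O(1)).


-- ===== PORT A =====
def chunk_cal (chunk : Int) (order : Int) : String :=
  if PySem.Int.mod chunk 2 == 0 then
    let p := (PySem.List.pyRange 0 order 1).foldl
      (fun (p : Int × Int) _ => (p.1 + 1, p.2 - 1)) (1, chunk)
    PySem.Int.toStr p.1 ++ "/" ++ PySem.Int.toStr p.2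
  else
    let p := (PySem.List.pyRange 0 order 1).foldl
      (fun (p : Int × Int) _ => (p.1 - 1, p.2 + 1)) (chunk, 1)
    PySem.Int.toStr p.1 ++ "/" ++ PySem.Int.toStr p.2

-- ===== PORT B =====
def chunk_cal_alt (chunk : Int) (order : Int) : String :=
  let k := max order 0
  if PySem.Int.mod chunk 2 == 0 then
    PySem.Int.toStr (1 + k) ++ "/" ++ PySem.Int.toStr (chunk - k)
  else
    PySem.Int.toStr (chunk - k) ++ "/" ++ PySem.Int.toStr (1 + k)

-- ===== PRECONDITION & SPEC =====
def Spec_chunk_cal (chunk : Int) (order : Int) (out : String) : Prop := out = chunk_cal_alt chunk order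
instance (chunk : Int) (order : Int) (out : String) : Decidable (Spec_chunk_cal chunk order out) := by unfold Spec_chunk_cal; infer_instance

-- ===== CLAIM (what is proved, stated in full; the proofs are below) =====
def Claim_equal_chunk_cal : Prop := ∀ (chunk : Int) (order : Int), Dom_chunk_cal chunk order → Spec_chunk_cal chunk order (chunk_cal chunk order)

-- ===== LEMMAS AND PROOFS =====
theorem foldl_inc_dec {α : Type} (l : List α) (a b : Int) :
    l.foldl (fun (p : Int × Int) _ => (p.1 + 1, p.2 - 1)) (a, b) = (a + l.length, b - l.length) := by
  induction l generalizing a b with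
  | nil => simp
  | cons x xs ih =>
      simp [List.foldl, ih]
      constructor <;> ring

theorem foldl_dec_inc {α : Type} (l : List α) (a b : Int) :
    l.foldl (fun (p : Int × Int) _ => (p.1 - 1, p.2 + 1)) (a, b) = (a - l.length, b + l.length) := by
  induction l generalizing a b with
  | nil => simp
  | cons x xs ih =>
      simp [List.foldl, ih]
      constructor <;> ring

-- ===== VERDICT (by name: the statement is the Claim_ definition above) =====
theorem chunk_cal_spec : Claim_equal_chunk_cal := by
  intro chunk order _
  unfold Spec_chunk_cal chunk_cal chunk_cal_alt
  have hlen : ((PySem.List.pyRange 0 order 1).length : Int) = max order 0 := by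
    rw [PySem.List.length_pyRange_one]; omega
  split_ifs with h
  · rw [foldl_inc_dec, hlen]
  · rw [foldl_dec_inc, hlen]
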